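-- pv_equiv track=rewrite | github.com/kosinya/tournament_creator | services/group.py | conflict_search
-- ===== SOURCE A (Python) =====
-- def conflict_search(groups):
--     ranked_players = {}
--     for player in groups:
--         if player['place'] not in ranked_players:
--             ranked_players[player['place']] = []
--         ranked_players[player['place']].append(player)
--
--     for key, value in ranked_players.items():
--         coincidences = {}
--         for player in value:
--             if player['group_name'] not in coincidences:
--                 coincidences[player['group_name']] = []
--             coincidences[player['group_name']].append(player)
--
--         for v in coincidences.values():
--             if len(v) > 1:
--                 return True
--
--     return False
-- ===== SOURCE B (Python) =====
-- def conflict_search(groups):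
--     seen = set()
--     for player in groups:
--         key = (player['place'], player['group_name'])
--         if key in seen:
--             return True
--         seen.add(key)
--     return False
-- ===== Notes on version B (the rewrite author's own statement) =====
-- stated objective: simpler
-- what changed: Replaces A's two-level grouping (place-keyed dict of player lists, then per-place group_name-keyed dict, then a length>1 scan) with a single pass over groups that keeps one set of (place, group_name) keys and returns True on the first repeat.
import Mathlib
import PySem

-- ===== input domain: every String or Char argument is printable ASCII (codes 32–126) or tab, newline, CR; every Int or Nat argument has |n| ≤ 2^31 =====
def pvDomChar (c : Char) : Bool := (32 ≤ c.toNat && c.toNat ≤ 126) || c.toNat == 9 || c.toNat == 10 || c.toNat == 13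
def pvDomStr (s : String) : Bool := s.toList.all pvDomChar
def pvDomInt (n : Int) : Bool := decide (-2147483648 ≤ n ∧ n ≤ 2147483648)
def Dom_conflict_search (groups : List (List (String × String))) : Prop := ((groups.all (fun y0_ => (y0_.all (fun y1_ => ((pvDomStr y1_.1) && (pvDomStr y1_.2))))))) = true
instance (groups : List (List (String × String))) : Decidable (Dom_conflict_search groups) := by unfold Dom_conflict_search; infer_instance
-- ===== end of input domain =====

-- B replaces A's two-level dict grouping (place -> players, then group_name -> players, then a length>1 scan) by one pass over groups keeping a set of (place, group_name) keys with early exit on the first repeat.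


-- ===== PORT A =====
-- player['k'] (a dict subscript); total via default "" — Pre_ excludes the missing-key inputs on which the Python raises KeyError
def pvGetStr (p : List (String × String)) (k : String) : String :=
  (PySem.Dict.mk p).getD k ""

def conflict_search (groups : List (List (String × String))) : Bool :=
  -- ranked_players: "if place not in d: d[place] = []; d[place].append(player)" = d.modify place [] (· ++ [player])
  let ranked : PySem.Dict String (List (List (String × String))) :=
    groups.foldl (fun d player => d.modify (pvGetStr player "place") [] (· ++ [player])) PySem.Dict.empty
  -- "for key, value in ranked.items(): … return True / return False" = any over items
  ranked.items.any (fun kv =>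
    let coincidences : PySem.Dict String (List (List (String × String))) :=
      kv.2.foldl (fun d player => d.modify (pvGetStr player "group_name") [] (· ++ [player])) PySem.Dict.empty
    coincidences.values.any (fun v => v.length > 1))

-- ===== PORT B =====
def conflict_search_loop (groups : List (List (String × String)))
    (seen : PySem.Set (String × String)) : Bool :=
  match groups with
  | [] => false
  | player :: rest =>
      let key := (pvGetStr player "place", pvGetStr player "group_name")
      if PySem.Set.contains seen key then true
      else conflict_search_loop rest (PySem.Set.add seen key)

def conflict_search_alt (groups : List (List (String × String))) : Bool :=
  conflict_search_loop groups PySem.Set.empty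

-- ===== PRECONDITION & SPEC =====
-- Pre_ excludes inputs where some player dict lacks "place" or "group_name": the Python A raises KeyError there
-- unless it returns True first, and A and B read the missing keys in different orders (A reads all places before any group_name).
def Pre_conflict_search (groups : List (List (String × String))) : Prop :=
  ∀ p ∈ groups, (PySem.Dict.mk p).contains "place" = true ∧ (PySem.Dict.mk p).contains "group_name" = true
instance (groups : List (List (String × String))) : Decidable (Pre_conflict_search groups) := by
  unfold Pre_conflict_search; infer_instance

def pvWitness_conflict_search : (List (List (String × String))) :=
  [[("place", "1"), ("group_name", "a")], [("place", "2"), ("group_name", "a")]]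

def Spec_conflict_search (groups : List (List (String × String))) (out : Bool) : Prop := out = conflict_search_alt groups
instance (groups : List (List (String × String))) (out : Bool) : Decidable (Spec_conflict_search groups out) := by unfold Spec_conflict_search; infer_instance

-- ===== CLAIM (what is proved, stated in full; the proofs are below) =====
def Claim_equal_conflict_search : Prop := ∀ (groups : List (List (String × String))), Dom_conflict_search groups → Pre_conflict_search groups → Spec_conflict_search groups (conflict_search groups)

-- ===== LEMMAS AND PROOFS =====
def pvKey (p : List (String × String)) : String × String :=
  (pvGetStr p "place", pvGetStr p "group_name")

theorem groupFold_getD (l : List (List (String × String))) (k2 : List (String × String) → String)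
    (c : String) :
    ((l.foldl (fun d player => d.modify (k2 player) [] (· ++ [player])) PySem.Dict.empty).getD c [])
      = l.filter (fun p => k2 p == c) := by
  have h2 : l.foldl (fun d player => d.modify (k2 player) [] (· ++ [player])) PySem.Dict.empty
      = (l.map (fun p => (k2 p, p))).foldl (fun d q => d.modify q.1 [] (· ++ [q.2])) PySem.Dict.empty := by
    rw [List.foldl_map]
  rw [h2, PySem.Dict.getD_foldl_modify_append]
  simp [List.filter_map, List.map_map, Function.comp_def]

theorem groupFold_keys (l : List (List (String × String))) (k2 : List (String × String) → String) :
    ((l.foldl (fun d player => d.modify (k2 player) [] (· ++ [player])) PySem.Dict.empty).keys)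
      = PySem.Set.ofList (l.map k2) := by
  rw [PySem.Dict.keys_foldl_modify_key]
  simp [PySem.Dict.keys_empty, PySem.Set.update_nil_left]

theorem groupFold_keys_nodup (l : List (List (String × String))) (k2 : List (String × String) → String) :
    ((l.foldl (fun d player => d.modify (k2 player) [] (· ++ [player])) PySem.Dict.empty).keys).Nodup :=
  PySem.Dict.nodup_keys_foldl_modify_key l k2 [] (fun _ x => (· ++ [x])) _ PySem.Dict.nodup_keys_empty

theorem count_map_eq_length_filter (v : List (List (String × String)))
    (k2 : List (String × String) → String) (c : String) :
    (v.map k2).count c = (v.filter (fun p => k2 p == c)).length := by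
  rw [List.count_eq_countP, List.countP_map, ← List.countP_eq_length_filter]
  rfl

theorem inner_iff (v : List (List (String × String))) (k2 : List (String × String) → String) :
    (∃ w ∈ ((v.foldl (fun d player => d.modify (k2 player) [] (· ++ [player])) PySem.Dict.empty).values),
        w.length > 1)
      ↔ ∃ c, 2 ≤ (v.map k2).count c := by
  rw [PySem.Dict.values_eq_map_keys _ (groupFold_keys_nodup v k2) [], groupFold_keys]
  constructor
  · rintro ⟨w, hw, hlen⟩
    obtain ⟨c, hc, rfl⟩ := List.mem_map.mp hw
    rw [groupFold_getD] at hlen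
    exact ⟨c, by rw [count_map_eq_length_filter]; omega⟩
  · rintro ⟨c, h2⟩
    rw [count_map_eq_length_filter] at h2
    refine ⟨v.filter (fun p => k2 p == c), ?_, by omega⟩
    refine List.mem_map.mpr ⟨c, ?_, by rw [groupFold_getD]⟩
    rw [PySem.Set.mem_ofList]
    have hne : v.filter (fun p => k2 p == c) ≠ [] := by
      intro h; rw [h] at h2; simp at h2
    obtain ⟨p, hp⟩ := List.exists_mem_of_ne_nil _ hne
    exact List.mem_map.mpr ⟨p, List.mem_of_mem_filter hp, by simpa using List.of_mem_filter hp⟩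

theorem key_count (groups : List (List (String × String))) (pl g : String) :
    (groups.map pvKey).count (pl, g)
      = ((groups.filter (fun p => pvGetStr p "place" == pl)).map (fun p => pvGetStr p "group_name")).count g := by
  rw [List.count_eq_countP, List.countP_map, List.count_eq_countP, List.countP_map,
    List.countP_filter]
  apply List.countP_congr
  intro p _
  simp [pvKey, Function.comp, Prod.ext_iff, and_comm]

theorem conflict_search_eq_true_iff (groups : List (List (String × String))) :
    conflict_search groups = true ↔ ∃ k, 2 ≤ (groups.map pvKey).count k := by
  simp only [conflict_search]
  rw [PySem.Dict.items_eq_map_keys _ (groupFold_keys_nodup groups _) []]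
  simp only [List.any_map, List.any_eq_true, Function.comp_def, decide_eq_true_eq, inner_iff,
    groupFold_getD, groupFold_keys, PySem.Set.mem_ofList]
  constructor
  · rintro ⟨pl, hpl, g, h2⟩
    exact ⟨(pl, g), by rw [key_count]; exact h2⟩
  · rintro ⟨⟨pl, g⟩, h2⟩
    rw [key_count] at h2
    refine ⟨pl, ?_, g, h2⟩
    have hne : groups.filter (fun p => pvGetStr p "place" == pl) ≠ [] := by
      intro h; rw [h] at h2; simp at h2
    obtain ⟨p, hp⟩ := List.exists_mem_of_ne_nil _ hne
    have hpv := List.mem_of_mem_filter hp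
    have hpc : pvGetStr p "place" = pl := by simpa using List.of_mem_filter hp
    exact List.mem_map.mpr ⟨p, hpv, hpc⟩

theorem conflict_search_loop_eq_true_iff (l : List (List (String × String))) :
    ∀ seen : PySem.Set (String × String), seen.Nodup →
      (conflict_search_loop l seen = true ↔ ¬ (seen ++ l.map pvKey).Nodup) := by
  induction l with
  | nil => intro seen h; simpa [conflict_search_loop] using h
  | cons p rest ih =>
    intro seen h
    simp only [conflict_search_loop, List.map_cons]
    by_cases hm : (pvGetStr p "place", pvGetStr p "group_name") ∈ seen
    · have hct : PySem.Set.contains seen (pvGetStr p "place", pvGetStr p "group_name") = true :=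
        (PySem.Set.contains_iff _ _).mpr hm
      rw [hct, if_pos rfl]
      refine iff_of_true rfl ?_
      intro hnd
      exact (List.nodup_append.mp hnd).2.2 _ hm _ List.mem_cons_self rfl
    · have hct : PySem.Set.contains seen (pvGetStr p "place", pvGetStr p "group_name") = false := by
        rw [← Bool.not_eq_true]; exact fun hc => hm ((PySem.Set.contains_iff _ _).mp hc)
      rw [hct]
      simp only [Bool.false_eq_true, if_false]
      have h' : (seen ++ [(pvGetStr p "place", pvGetStr p "group_name")]).Nodup := by
        rw [List.nodup_append]
        refine ⟨h, List.nodup_singleton _, ?_⟩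
        intro a ha b hb
        rw [List.mem_singleton] at hb
        subst hb
        exact fun e => hm (e ▸ ha)
      rw [PySem.Set.add_of_not_mem hm, ih _ h', List.append_assoc, List.singleton_append]
      simp [pvKey]
theorem conflict_search_alt_eq_true_iff (groups : List (List (String × String))) :
    conflict_search_alt groups = true ↔ ∃ k, 2 ≤ (groups.map pvKey).count k := by
  have h0 : conflict_search_alt groups = conflict_search_loop groups [] := rfl
  rw [h0, conflict_search_loop_eq_true_iff _ _ List.nodup_nil, List.nil_append]
  rw [List.nodup_iff_count_le_one]
  push Not
  constructor <;> rintro ⟨k, hk⟩ <;> exact ⟨k, by omega⟩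

-- ===== VERDICT (by name: the statement is the Claim_ definition above) =====
theorem conflict_search_spec : Claim_equal_conflict_search := by
  intro groups _ _
  unfold Spec_conflict_search
  have hA := conflict_search_eq_true_iff groups
  have hB := conflict_search_alt_eq_true_iff groups
  cases ha : conflict_search groups <;> cases hb : conflict_search_alt groups <;> simp_all
  all_goals first
    | (obtain ⟨a, b, h2⟩ := hB; have := hA a b; omega)
    | (obtain ⟨a, b, h2⟩ := hA; have := hB a b; omega)
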